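-- pv_equiv track=rewrite | github.com/MK-YR/HackerRank-Task-Archive | Mathematics/Super Humble Matrix.py | solve
-- ===== SOURCE A (Python) =====
-- def solve(n, m):
--     a = min(n, m)
--     b = max(n, m)
--     MOD = 10**9 + 7
--     fact = [1] * (a + 1) #Precompute factorials up to a
--     for i in range(1, a + 1):
--         fact[i] = fact[i - 1] * i % MOD
--     result = 1
--     for i in range(1, a + 1): #Increasing part: 1!*2!*...*a!
--         result = result * fact[i] % MOD
--     result = result * pow(fact[a], b - a, MOD) % MOD #Constant middle part: (a!)^(b-a)
--     for i in range(1, a): # Decreasing part: (a-1)!*...*1!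
--         result = result * fact[i] % MOD
--     return result
-- ===== SOURCE B (Python) =====
-- def solve(n, m):
--     # One fused loop with a running factorial, using
--     # prod_{i=1}^{a} i! * (a!)^(b-a) * prod_{i=1}^{a-1} i!
--     #   = (prod_{i=1}^{a-1} (i!)^2) * (a!)^(b-a+1)
--     a, b = (n, m) if n <= m else (m, n)
--     MOD = 10**9 + 7
--     f = 1
--     result = 1
--     for i in range(1, a):
--         f = f * i % MOD
--         result = result * f * f % MOD
--     if a >= 1:
--         f = f * a % MOD
--     return result * pow(f, b - a + 1, MOD) % MOD
-- ===== Notes on version B (the rewrite author's own statement) =====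
-- stated objective: simpler
-- what changed: Replaces the precomputed factorial array and three separate product passes by one fused loop with a running factorial (no list, one pass), using the identity (prod_{i<=a} i!)*(a!)^(b-a)*(prod_{i<a} i!) = (prod_{i<a}(i!)^2)*(a!)^(b-a+1).
import Mathlib
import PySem

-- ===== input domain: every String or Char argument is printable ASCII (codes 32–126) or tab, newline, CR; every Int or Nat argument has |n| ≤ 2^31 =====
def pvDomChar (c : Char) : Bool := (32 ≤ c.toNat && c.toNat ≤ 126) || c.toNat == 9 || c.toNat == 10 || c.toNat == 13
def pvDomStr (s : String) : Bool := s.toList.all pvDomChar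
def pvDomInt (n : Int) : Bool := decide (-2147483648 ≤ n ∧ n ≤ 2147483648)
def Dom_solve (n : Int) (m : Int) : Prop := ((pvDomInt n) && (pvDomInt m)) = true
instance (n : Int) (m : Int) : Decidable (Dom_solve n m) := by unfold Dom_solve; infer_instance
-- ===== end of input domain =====

-- B replaces A's factorial table and three separate product passes by one fused loop
-- with a running factorial (same asymptotic cost; a simpler single-pass decomposition).

-- ===== PORT A =====
-- Shared hand-port of Python's three-argument pow (square-and-multiply, exactly
-- CPython's fast modular exponentiation; both Pythons call pow(x, e, MOD)). It is
-- exact where used: pvPowMod b e m = (b ^ e) % m for 0 < m, proved below.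
-- (PySem.Int.powMod computes b ^ e in full, which cannot be evaluated for the
-- exponents of size ≈ 2^31 this function meets.)
def pvPowMod (b : Int) (e : Nat) (m : Int) : Int :=
  if h : e = 0 then PySem.Int.mod 1 m
  else
    let half := pvPowMod (PySem.Int.mod (b * b) m) (e / 2) m
    if e % 2 = 1 then PySem.Int.mod (half * b) m else half
  decreasing_by exact Nat.div_lt_self (Nat.pos_of_ne_zero h) one_lt_two

def solve (n : Int) (m : Int) : Int :=
  let a := min n m
  let b := max n m
  let MOD : Int := 10 ^ 9 + 7
  let fact : List Int := List.replicate (a + 1).toNat 1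
  let fact := (PySem.List.pyRange 1 (a + 1)).foldl
    (fun f i => f.set i.toNat (PySem.Int.mod (PySem.List.pyGetD f (i - 1) 0 * i) MOD)) fact
  let result : Int := (PySem.List.pyRange 1 (a + 1)).foldl
    (fun r i => PySem.Int.mod (r * PySem.List.pyGetD fact i 0) MOD) 1
  -- fact[a] raises IndexError in Python when a < 0 (fact is then empty); those
  -- inputs are excluded by Pre_solve, so the default 0 is never used inside Pre_.
  let result := PySem.Int.mod
    (result * pvPowMod (PySem.List.pyGetD fact a 0) (b - a).toNat MOD) MOD
  (PySem.List.pyRange 1 a).foldl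
    (fun r i => PySem.Int.mod (r * PySem.List.pyGetD fact i 0) MOD) result

-- ===== PORT B =====
def solve_alt (n : Int) (m : Int) : Int :=
  let p := if n ≤ m then (n, m) else (m, n)
  let a := p.1
  let b := p.2
  let MOD : Int := 10 ^ 9 + 7
  let fr := (PySem.List.pyRange 1 a).foldl
    (fun (s : Int × Int) i =>
      let f := PySem.Int.mod (s.1 * i) MOD
      (f, PySem.Int.mod (s.2 * f * f) MOD)) (1, 1)
  let f := if 1 ≤ a then PySem.Int.mod (fr.1 * a) MOD else fr.1
  PySem.Int.mod (fr.2 * pvPowMod f (b - a + 1).toNat MOD) MOD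

-- ===== PRECONDITION & SPEC =====
-- A raises IndexError exactly when min(n, m) < 0: fact is then the empty list and fact[a] fails.
def Pre_solve (n : Int) (m : Int) : Prop := 0 ≤ min n m
instance (n : Int) (m : Int) : Decidable (Pre_solve n m) := by unfold Pre_solve; infer_instance
def pvWitness_solve : Int × Int := (3, 5)

def Spec_solve (n : Int) (m : Int) (out : Int) : Prop := out = solve_alt n m
instance (n : Int) (m : Int) (out : Int) : Decidable (Spec_solve n m out) := by unfold Spec_solve; infer_instance

-- ===== CLAIM (what is proved, stated in full; the proofs are below) =====
def Claim_equal_solve : Prop := ∀ (n : Int) (m : Int), Dom_solve n m → Pre_solve n m → Spec_solve n m (solve n m)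

-- ===== LEMMAS AND PROOFS =====

def pvM : Int := 10 ^ 9 + 7

lemma pvM_pos : 0 < pvM := by norm_num [pvM]

lemma pv_pvPowMod_eq (b : Int) (e : Nat) (m : Int) (hm : 0 < m) :
    pvPowMod b e m = b ^ e % m := by
  induction e using Nat.strong_induction_on generalizing b with
  | _ e ih =>
    rw [pvPowMod]
    split
    · rename_i h
      subst h
      rw [PySem.Int.mod_eq_emod_of_pos hm, pow_zero]
    · rename_i h
      rw [ih (e / 2) (Nat.div_lt_self (Nat.pos_of_ne_zero h) one_lt_two)]
      have hsq : (PySem.Int.mod (b * b) m) ^ (e / 2) % m = b ^ (2 * (e / 2)) % m := by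
        calc (PySem.Int.mod (b * b) m) ^ (e / 2) % m
            = (b * b) ^ (e / 2) % m := by
              rw [PySem.Int.mod_eq_emod_of_pos hm]
              exact Int.ModEq.pow _ (Int.emod_emod_of_dvd _ dvd_rfl)
          _ = b ^ (2 * (e / 2)) % m := by rw [pow_mul, pow_two]
      split
      · rename_i hodd
        rw [PySem.Int.mod_eq_emod_of_pos hm]
        have h1 : (PySem.Int.mod (b * b) m) ^ (e / 2) % m * b % m
            = b ^ (2 * (e / 2)) * b % m :=
          Int.ModEq.mul_right b ((Int.emod_emod_of_dvd _ dvd_rfl).trans hsq)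
        rw [h1, ← pow_succ]
        congr 2
        omega
      · rename_i heven
        show (PySem.Int.mod (b * b) m) ^ (e / 2) % m = b ^ e % m
        rw [hsq]
        congr 2
        omega

lemma pv_pvPowMod_mod (b : Int) (e : Nat) :
    pvPowMod b e pvM = PySem.Int.mod (b ^ e) pvM := by
  rw [pv_pvPowMod_eq b e pvM pvM_pos, PySem.Int.mod_eq_emod_of_pos pvM_pos]

/-- factorial mod, exactly as both loops compute it -/
def pvF : Nat → Int
  | 0 => 1
  | k + 1 => PySem.Int.mod (pvF k * ((k : Int) + 1)) pvM

/-- pure (un-reduced) product pvF 1 * … * pvF k -/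
def pvP : Nat → Int
  | 0 => 1
  | k + 1 => pvP k * pvF (k + 1)

/-- B's squared-product accumulator -/
def pvSB : Nat → Int
  | 0 => 1
  | k + 1 => PySem.Int.mod (pvSB k * pvF (k + 1) * pvF (k + 1)) pvM

lemma pv_pyRange_one_one : PySem.List.pyRange 1 1 = [] := by decide
lemma pv_pyRange_one_zero : PySem.List.pyRange 1 0 = [] := by decide

lemma pv_modeq_mod (x : Int) : PySem.Int.mod x pvM ≡ x [ZMOD pvM] := by
  rw [PySem.Int.mod_eq_emod_of_pos pvM_pos]
  exact Int.emod_emod_of_dvd _ dvd_rfl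

lemma pv_red_eq {r s : Int} (hr : ∃ x, r = PySem.Int.mod x pvM)
    (hs : ∃ y, s = PySem.Int.mod y pvM) (h : r ≡ s [ZMOD pvM]) : r = s := by
  obtain ⟨x, rfl⟩ := hr
  obtain ⟨y, rfl⟩ := hs
  have h' : x % pvM % pvM = y % pvM % pvM := by
    rw [PySem.Int.mod_eq_emod_of_pos pvM_pos, PySem.Int.mod_eq_emod_of_pos pvM_pos] at h
    exact h
  rw [PySem.Int.mod_eq_emod_of_pos pvM_pos, PySem.Int.mod_eq_emod_of_pos pvM_pos]
  calc x % pvM = x % pvM % pvM := (Int.emod_emod_of_dvd _ dvd_rfl).symm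
    _ = y % pvM % pvM := h'
    _ = y % pvM := Int.emod_emod_of_dvd _ dvd_rfl

lemma pv_fold_red (l : List Int) (fact : List Int) (r0 : Int)
    (h : ∃ x, r0 = PySem.Int.mod x pvM) :
    ∃ x, l.foldl (fun r i => PySem.Int.mod (r * PySem.List.pyGetD fact i 0) pvM) r0
      = PySem.Int.mod x pvM := by
  induction l generalizing r0 with
  | nil => exact h
  | cons i l ih => exact ih _ ⟨_, rfl⟩

lemma pv_getF (N k : Nat) (h : k < N + 1) :
    PySem.List.pyGetD ((List.range (N + 1)).map pvF) ((k : Int)) 0 = pvF k := by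
  rw [PySem.List.pyGetD_natCast, List.getD_eq_getElem?_getD, List.getElem?_map,
    List.getElem?_range h]
  simp

lemma pv_factLoop (N k : Nat) (hk : k ≤ N) :
    (PySem.List.pyRange 1 ((k : Int) + 1)).foldl
      (fun f i => f.set i.toNat (PySem.Int.mod (PySem.List.pyGetD f (i - 1) 0 * i) pvM))
      (List.replicate (N + 1) 1)
    = (List.range (N + 1)).map (fun j => if j ≤ k then pvF j else 1) := by
  induction k with
  | zero =>
    rw [show ((0 : Nat) : Int) + 1 = 1 by norm_num, pv_pyRange_one_one]
    simp only [List.foldl_nil]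
    apply List.ext_getElem (by simp)
    intro j h1 h2
    simp only [List.getElem_replicate, List.getElem_map, List.getElem_range]
    rcases Nat.eq_zero_or_pos j with h | h
    · subst h; simp [pvF]
    · rw [if_neg (by omega)]
  | succ k ih =>
    have hk' : k ≤ N := by omega
    rw [show ((k + 1 : Nat) : Int) + 1 = ((k : Int) + 1) + 1 by push_cast; ring,
      PySem.List.pyRange_one_succ_right (by omega), List.foldl_append, ih hk']
    simp only [List.foldl_cons, List.foldl_nil]
    have h1 : ((k : Int) + 1).toNat = k + 1 := by omega
    have h2 : ((k : Int) + 1) - 1 = (k : Int) := by ring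
    rw [h1, h2, PySem.List.pyGetD_natCast, List.getD_eq_getElem?_getD]
    rw [List.getElem?_map, List.getElem?_range (by omega)]
    simp only [Option.map_some, Option.getD_some, if_pos (le_refl k)]
    apply List.ext_getElem (by simp)
    intro j hj1 hj2
    rw [List.getElem_set]
    simp only [List.getElem_map, List.getElem_range]
    by_cases hje : k + 1 = j
    · subst hje
      rw [if_pos rfl, if_pos (le_refl (k + 1))]
      show PySem.Int.mod (pvF k * ((k : Int) + 1)) pvM = pvF (k + 1)
      rfl
    · rw [if_neg hje]
      by_cases hjk : j ≤ k
      · rw [if_pos hjk, if_pos (by omega)]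
      · rw [if_neg hjk, if_neg (by omega)]

lemma pv_factList (N : Nat) :
    (PySem.List.pyRange 1 ((N : Int) + 1)).foldl
      (fun f i => f.set i.toNat (PySem.Int.mod (PySem.List.pyGetD f (i - 1) 0 * i) pvM))
      (List.replicate (N + 1) 1)
    = (List.range (N + 1)).map pvF := by
  rw [pv_factLoop N N le_rfl]
  refine List.map_congr_left fun j hj => ?_
  rw [List.mem_range] at hj
  rw [if_pos (by omega)]

lemma pv_mulFold (N k : Nat) (hk : k ≤ N) (r0 : Int) :
    (PySem.List.pyRange 1 ((k : Int) + 1)).foldl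
      (fun r i => PySem.Int.mod (r * PySem.List.pyGetD ((List.range (N + 1)).map pvF) i 0) pvM) r0
    ≡ r0 * pvP k [ZMOD pvM] := by
  induction k with
  | zero =>
    rw [show ((0 : Nat) : Int) + 1 = 1 by norm_num, pv_pyRange_one_one]
    simp [pvP]
  | succ k ih =>
    rw [show ((k + 1 : Nat) : Int) + 1 = ((k : Int) + 1) + 1 by push_cast; ring,
      PySem.List.pyRange_one_succ_right (by omega), List.foldl_append]
    simp only [List.foldl_cons, List.foldl_nil]
    rw [show (k : Int) + 1 = ((k + 1 : Nat) : Int) by push_cast; ring,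
      pv_getF N (k + 1) (by omega)]
    calc PySem.Int.mod (_ * pvF (k + 1)) pvM
        ≡ _ * pvF (k + 1) [ZMOD pvM] := pv_modeq_mod _
      _ ≡ (r0 * pvP k) * pvF (k + 1) [ZMOD pvM] := (ih (by omega)).mul_right _
      _ = r0 * pvP (k + 1) := by rw [pvP]; ring

lemma pv_bLoop (k : Nat) :
    (PySem.List.pyRange 1 ((k : Int) + 1)).foldl
      (fun (s : Int × Int) i =>
        (PySem.Int.mod (s.1 * i) pvM,
          PySem.Int.mod (s.2 * PySem.Int.mod (s.1 * i) pvM * PySem.Int.mod (s.1 * i) pvM) pvM))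
      (1, 1)
    = (pvF k, pvSB k) := by
  induction k with
  | zero =>
    rw [show ((0 : Nat) : Int) + 1 = 1 by norm_num, pv_pyRange_one_one]
    simp [pvF, pvSB]
  | succ k ih =>
    rw [show ((k + 1 : Nat) : Int) + 1 = ((k : Int) + 1) + 1 by push_cast; ring,
      PySem.List.pyRange_one_succ_right (by omega), List.foldl_append, ih]
    simp only [List.foldl_cons, List.foldl_nil]
    show (PySem.Int.mod (pvF k * ((k : Int) + 1)) pvM,
      PySem.Int.mod (pvSB k * _ * _) pvM) = (pvF (k + 1), pvSB (k + 1))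
    rfl

lemma pv_SB_congr (k : Nat) : pvSB k ≡ pvP k * pvP k [ZMOD pvM] := by
  induction k with
  | zero => simp [pvSB, pvP]
  | succ k ih =>
    calc pvSB (k + 1) ≡ pvSB k * pvF (k + 1) * pvF (k + 1) [ZMOD pvM] := pv_modeq_mod _
      _ ≡ (pvP k * pvP k) * pvF (k + 1) * pvF (k + 1) [ZMOD pvM] :=
          ((ih.mul_right _).mul_right _)
      _ = pvP (k + 1) * pvP (k + 1) := by rw [pvP]; ring

lemma pv_main (N : Nat) (b : Int) (hb : (N : Int) ≤ b) :
    solve (N : Int) b = solve_alt (N : Int) b := by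
  simp only [solve, solve_alt, min_eq_left hb, max_eq_right hb, if_pos hb,
    show ((10 : Int) ^ 9 + 7 : Int) = pvM from rfl]
  rw [show ((N : Int) + 1).toNat = N + 1 by omega, pv_factList N,
    pv_getF N N (by omega)]
  simp only [pv_pvPowMod_mod]
  cases N with
  | zero =>
    simp only [Nat.cast_zero, zero_add, pv_pyRange_one_one, pv_pyRange_one_zero,
      List.foldl_nil]
    norm_num [pvF]
  | succ K =>
    rw [show ((K + 1 : Nat) : Int) = (K : Int) + 1 by push_cast; ring]
    rw [pv_bLoop K, if_pos (by omega : (1 : Int) ≤ (K : Int) + 1)]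
    have hf : PySem.Int.mod ((pvF K, pvSB K).1 * ((K : Int) + 1)) pvM = pvF (K + 1) := rfl
    rw [hf]
    have hexp : (b - ((K : Int) + 1) + 1).toNat = (b - ((K : Int) + 1)).toNat + 1 := by omega
    rw [hexp]
    apply pv_red_eq (pv_fold_red _ _ _ ⟨_, rfl⟩) ⟨_, rfl⟩
    have h2 : (PySem.List.pyRange 1 ((K : Int) + 1 + 1)).foldl
        (fun r i => PySem.Int.mod (r * PySem.List.pyGetD ((List.range (K + 1 + 1)).map pvF) i 0) pvM) 1
        ≡ pvP (K + 1) [ZMOD pvM] := by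
      have h := pv_mulFold (K + 1) (K + 1) le_rfl 1
      push_cast at h
      simpa using h
    set FM := (List.range (K + 1 + 1)).map pvF with hFM
    set e := (b - ((K : Int) + 1)).toNat with he
    have hmid : PySem.Int.mod
        ((PySem.List.pyRange 1 ((K : Int) + 1 + 1)).foldl
          (fun r i => PySem.Int.mod (r * PySem.List.pyGetD FM i 0) pvM) 1 *
          PySem.Int.mod (pvF (K + 1) ^ e) pvM) pvM
        ≡ pvP (K + 1) * pvF (K + 1) ^ e [ZMOD pvM] :=
      (pv_modeq_mod _).trans (h2.mul (pv_modeq_mod _))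
    have h3 := pv_mulFold (K + 1) K (by omega)
      (PySem.Int.mod
        ((PySem.List.pyRange 1 ((K : Int) + 1 + 1)).foldl
          (fun r i => PySem.Int.mod (r * PySem.List.pyGetD FM i 0) pvM) 1 *
          PySem.Int.mod (pvF (K + 1) ^ e) pvM) pvM)
    refine h3.trans ?_
    have hB : PySem.Int.mod ((pvF K, pvSB K).2 * PySem.Int.mod (pvF (K + 1) ^ (e + 1)) pvM) pvM
        ≡ (pvP K * pvP K) * pvF (K + 1) ^ (e + 1) [ZMOD pvM] :=
      (pv_modeq_mod _).trans ((pv_SB_congr K).mul (pv_modeq_mod _))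
    refine Int.ModEq.trans ?_ hB.symm
    refine (hmid.mul_right (pvP K)).trans ?_
    have : pvP (K + 1) * pvF (K + 1) ^ e * pvP K = (pvP K * pvP K) * pvF (K + 1) ^ (e + 1) := by
      rw [pvP]; ring
    rw [this]

lemma pv_solve_comm (n m : Int) : solve n m = solve m n := by
  simp only [solve, min_comm, max_comm]

lemma pv_alt_comm (n m : Int) (h : m ≤ n) : solve_alt n m = solve_alt m n := by
  by_cases hnm : n ≤ m
  · have : n = m := le_antisymm hnm h
    subst this; rfl
  · simp only [solve_alt, if_neg hnm, if_pos h]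

-- ===== VERDICT (by name: the statement is the Claim_ definition above) =====
theorem solve_spec : Claim_equal_solve := by
  intro n m _ hpre
  unfold Spec_solve
  unfold Pre_solve at hpre
  obtain ⟨hn, hm⟩ := le_min_iff.mp hpre
  by_cases h : n ≤ m
  · obtain ⟨N, rfl⟩ : ∃ N : Nat, n = (N : Int) := ⟨n.toNat, (Int.toNat_of_nonneg hn).symm⟩
    exact pv_main N m h
  · have h' : m ≤ n := le_of_not_ge h
    rw [pv_solve_comm, pv_alt_comm n m h']
    obtain ⟨N, rfl⟩ : ∃ N : Nat, m = (N : Int) := ⟨m.toNat, (Int.toNat_of_nonneg hm).symm⟩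
    exact pv_main N n h'
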